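-- pv_equiv track=rewrite | github.com/hutao99/compiler | suanfu.py | prostr
-- ===== SOURCE A (Python) =====
-- def prostr(grammer):
--     pro_str = []
--     for gra_line in grammer:
--         gra_line = gra_line.split()
--         #先看每一行有几个产生式，把每一个产生式的开始索引加入pro_index
--         pro_index = []
--         i = 0
--         while i < len(gra_line):
--             if gra_line[i] == '->' or gra_line[i] == '|':
--                 pro_index.append(i + 1)
--             i += 1
--         for p in pro_index:
--             str = []
--             for s in gra_line[p:]:
--                 if s == '|':
--                     break
--                 else:
--                     str.append(s)
--             pro_str.append(str)
--     return pro_str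
-- ===== SOURCE B (Python) =====
-- def prostr(grammer):
--     pro_str = []
--     for gra_line in grammer:
--         cur = []          # tokens of the running until-next-'|' suffix, in reverse
--         rev = []          # productions of this line, rightmost first
--         for t in reversed(gra_line.split()):
--             if t == '->' or t == '|':
--                 rev.append(cur[::-1])
--             if t == '|':
--                 cur = []
--             else:
--                 cur.append(t)
--         pro_str.extend(reversed(rev))
--     return pro_str
-- ===== Notes on version B (the rewrite author's own statement) =====
-- stated objective: alternative
-- what changed: Replaced the two-phase per-line work (collect all delimiter start indices, then for each index re-scan a slice of the token list until the next '|') by a single right-to-left pass that maintains the running until-next-'|' suffix and emits it at each delimiter, so the index list and the per-production re-scan disappear.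
import Mathlib
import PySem

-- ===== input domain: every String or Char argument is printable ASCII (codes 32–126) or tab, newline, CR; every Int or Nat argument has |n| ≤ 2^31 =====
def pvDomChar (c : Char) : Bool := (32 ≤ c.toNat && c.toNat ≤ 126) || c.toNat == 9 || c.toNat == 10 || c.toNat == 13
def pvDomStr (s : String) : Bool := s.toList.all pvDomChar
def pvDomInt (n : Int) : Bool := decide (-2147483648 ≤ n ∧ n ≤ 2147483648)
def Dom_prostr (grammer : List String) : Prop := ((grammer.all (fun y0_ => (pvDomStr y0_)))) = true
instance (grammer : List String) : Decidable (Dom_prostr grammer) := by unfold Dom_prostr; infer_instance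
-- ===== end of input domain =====

-- B replaces A's per-delimiter re-scan of token-list slices by one right-to-left pass that
-- maintains the running until-next-'|' suffix and emits it at each delimiter (objective: alternative).

-- ===== PORT A =====
-- A's inner "for s in gra_line[p:]: if s == '|': break else: str.append(s)" loop.
def prostrTake : List String → List String
  | [] => []
  | s :: rest => if s == "|" then [] else s :: prostrTake rest

def prostr (grammer : List String) : List (List String) :=
  grammer.foldl (fun pro_str gra_line₀ =>
    let gra_line := PySem.Str.split₀ gra_line₀
    -- the while loop over i counting 0,1,… is the fold over range(len(gra_line))
    let pro_index := (PySem.List.pyRange 0 (gra_line.length : Int) 1).foldl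
      (fun acc i =>
        if PySem.List.pyGetD gra_line i "" == "->" || PySem.List.pyGetD gra_line i "" == "|"
        then acc ++ [i + 1] else acc) []
    pro_index.foldl (fun acc p =>
      acc ++ [prostrTake (PySem.List.slice gra_line (some p) none)]) pro_str) []

-- ===== PORT B =====
def prostr_alt (grammer : List String) : List (List String) :=
  grammer.foldl (fun pro_str gra_line =>
    let st := (PySem.Str.split₀ gra_line).reverse.foldl
      (fun (st : List String × List (List String)) t =>
        let rev := if t == "->" || t == "|" then st.2 ++ [st.1.reverse] else st.2
        let cur := if t == "|" then [] else st.1 ++ [t]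
        (cur, rev)) ([], [])
    pro_str ++ st.2.reverse) []

-- ===== PRECONDITION & SPEC =====
def Spec_prostr (grammer : List String) (out : List (List String)) : Prop := out = prostr_alt grammer
instance (grammer : List String) (out : List (List String)) : Decidable (Spec_prostr grammer out) := by unfold Spec_prostr; infer_instance

-- ===== CLAIM (what is proved, stated in full; the proofs are below) =====
def Claim_equal_prostr : Prop := ∀ (grammer : List String), Dom_prostr grammer → Spec_prostr grammer (prostr grammer)

-- ===== LEMMAS AND PROOFS =====

/-- Mediator: the productions of one tokenised line, leftmost delimiter first. -/
def prostrProds : List String → List (List String)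
  | [] => []
  | t :: rest =>
      (if t == "->" || t == "|" then [prostrTake rest] else []) ++ prostrProds rest

/-- B's reversed fold computes the reversed running suffix and the reversed production list. -/
lemma prostr_alt_foldr (ts : List String) :
    ts.foldr (fun t (st : List String × List (List String)) =>
        ((if t == "|" then [] else st.1 ++ [t]),
         (if t == "->" || t == "|" then st.2 ++ [st.1.reverse] else st.2))) ([], []) =
      ((prostrTake ts).reverse, (prostrProds ts).reverse) := by
  induction ts with
  | nil => rfl
  | cons t rest ih =>
      simp only [List.foldr_cons, ih, prostrTake, prostrProds]
      by_cases h1 : t == "|" <;> by_cases h2 : t == "->" <;> simp [h1, h2]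

/-- A's index list then per-index scans equal the mediator. -/
lemma prostr_line_eq (ts : List String) :
    ((List.range ts.length).filter
        (fun k => ts.getD k "" == "->" || ts.getD k "" == "|")).map
      (fun k => prostrTake (ts.drop (k + 1))) = prostrProds ts := by
  induction ts with
  | nil => rfl
  | cons t rest ih =>
      rw [List.length_cons, List.range_succ_eq_map]
      simp only [List.filter_cons, List.getD_cons_zero, List.filter_map,
        prostrProds]
      by_cases h : t == "->" || t == "|" <;>
        simp [h, Function.comp_def, Nat.succ_eq_add_one, ← ih]

theorem prostr_spec_aux : ∀ (grammer : List String), prostr grammer = prostr_alt grammer := by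
  intro grammer
  unfold prostr prostr_alt
  congr 1
  funext pro_str line
  simp only [List.foldl_reverse, prostr_alt_foldr, List.reverse_reverse]
  rw [PySem.List.pyRange_one]
  simp only [Int.sub_zero, Int.toNat_natCast, List.foldl_map, Int.zero_add,
    PySem.List.pyGetD_natCast]
  rw [PySem.List.foldl_append_if
        (fun k : Nat => (PySem.Str.split₀ line).getD k "" == "->" ||
                        (PySem.Str.split₀ line).getD k "" == "|")
        (fun k : Nat => (k : Int) + 1)]
  simp only [List.nil_append]
  rw [PySem.List.foldl_append_singleton_eq_map]
  rw [List.map_map]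
  congr 1
  rw [← prostr_line_eq (PySem.Str.split₀ line)]
  apply List.map_congr_left
  intro k hk
  simp only [Function.comp_def]
  have : ((k : Int) + 1) = ((k + 1 : Nat) : Int) := by push_cast; ring
  rw [this, PySem.List.slice_from_natCast]

-- ===== VERDICT (by name: the statement is the Claim_ definition above) =====
theorem prostr_spec : Claim_equal_prostr := by
  intro grammer _
  exact prostr_spec_aux grammer
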